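-- pv_equiv track=rewrite | github.com/tacowasabii/online-judge | 프로그래머스/2/132265. 롤케이크 자르기/롤케이크 자르기.py | solution
-- ===== SOURCE A (Python) =====
-- from collections import Counter
--
-- def solution(topping):
--     answer = 0
--     left = Counter()
--     right = Counter(topping)
--
--     for i in range(len(topping)):
--         left[topping[i]] += 1
--         right[topping[i]] -= 1
--
--         if right[topping[i]] == 0:
--             del right[topping[i]]
--
--         if len(left) == len(right):
--             answer += 1
--     return answer
-- ===== SOURCE B (Python) =====
-- def solution(topping):
--     # backward pass: suffix-distinct table; suf[i] = distinct toppings in topping[i:]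
--     suf = [0]
--     seen = set()
--     for t in reversed(topping):
--         seen.add(t)
--         suf.append(len(seen))
--     suf.reverse()
--     answer = 0
--     left = set()
--     for t, s in zip(topping, suf[1:]):
--         left.add(t)
--         if len(left) == s:
--             answer += 1
--     return answer
-- ===== Notes on version B (the rewrite author's own statement) =====
-- stated objective: alternative
-- what changed: Replaces the live right-side Counter (decrement and delete-at-zero in lockstep) by a suffix-distinct table precomputed in one backward pass over plain sets, then a forward pass comparing a left set's size against the table.
import Mathlib
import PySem

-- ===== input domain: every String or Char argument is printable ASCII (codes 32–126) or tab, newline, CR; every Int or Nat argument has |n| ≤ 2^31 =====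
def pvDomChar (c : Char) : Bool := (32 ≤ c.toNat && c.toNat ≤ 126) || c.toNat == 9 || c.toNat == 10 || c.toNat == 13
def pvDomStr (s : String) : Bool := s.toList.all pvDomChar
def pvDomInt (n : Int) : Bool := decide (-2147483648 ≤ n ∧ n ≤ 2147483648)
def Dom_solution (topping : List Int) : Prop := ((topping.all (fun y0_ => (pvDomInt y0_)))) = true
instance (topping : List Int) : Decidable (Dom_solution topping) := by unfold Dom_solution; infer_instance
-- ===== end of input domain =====

-- B replaces A's live right-side Counter (decrement + delete-at-zero) by a precomputed
-- suffix-distinct table built in a backward pass over sets (alternative decomposition, same O(n) cost).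

-- ===== PORT A =====
-- loop body of A: left[t] += 1; right[t] -= 1; if right[t] == 0: del right[t]; if len(left) == len(right): answer += 1
def stepA (acc : Int × PySem.Dict Int Int × PySem.Dict Int Int) (t : Int) :
    Int × PySem.Dict Int Int × PySem.Dict Int Int :=
  let left := acc.2.1.modify t 0 (· + 1)
  let right0 := acc.2.2.modify t 0 (· - 1)
  let right := if right0.getD t 0 = 0 then right0.erase t else right0
  (if left.size = right.size then acc.1 + 1 else acc.1, left, right)

def solution (topping : List Int) : Int :=
  ((PySem.List.pyRange 0 (topping.length : Int)).foldl
      (fun acc i => stepA acc (PySem.List.pyGetD topping i 0))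
      (0, PySem.Dict.empty, PySem.Dict.counter topping)).1

-- ===== PORT B =====
-- backward-pass body: seen.add(t); suf.append(len(seen))
def stepSuf (acc : List Int × PySem.Set Int) (t : Int) : List Int × PySem.Set Int :=
  let seen := acc.2.add t
  (acc.1 ++ [PySem.Set.len seen], seen)

-- forward-pass body: left.add(t); if len(left) == s: answer += 1
def stepB (acc : Int × PySem.Set Int) (p : Int × Int) : Int × PySem.Set Int :=
  let left := acc.2.add p.1
  (if PySem.Set.len left = p.2 then acc.1 + 1 else acc.1, left)

def solution_alt (topping : List Int) : Int :=
  let suf := ((topping.reverse.foldl stepSuf ([0], PySem.Set.empty)).1).reverse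
  ((topping.zip (PySem.List.slice suf (some 1))).foldl stepB (0, PySem.Set.empty)).1

-- ===== PRECONDITION & SPEC =====
def Spec_solution (topping : List Int) (out : Int) : Prop := out = solution_alt topping
instance (topping : List Int) (out : Int) : Decidable (Spec_solution topping out) := by unfold Spec_solution; infer_instance

-- ===== CLAIM (what is proved, stated in full; the proofs are below) =====
def Claim_equal_solution : Prop := ∀ (topping : List Int), Dom_solution topping → Spec_solution topping (solution topping)

-- ===== LEMMAS AND PROOFS =====

-- reference: number of cut points with equally many distinct toppings on both sides,
-- scanning the remaining list r with L = set of toppings already on the left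
def refCount (L : Finset Int) : List Int → Int
  | [] => 0
  | t :: r => (if (insert t L).card = r.toFinset.card then 1 else 0) + refCount (insert t L) r

-- the full suffix-distinct table [d(drop 0), d(drop 1), …, d(drop (n-1)), 0]
def fullSuf : List Int → List Int
  | [] => [0]
  | t :: r => ((t :: r).toFinset.card : Int) :: fullSuf r

theorem len_card {l : List Int} {L : Finset Int} (hn : l.Nodup) (hm : ∀ v, v ∈ l ↔ v ∈ L) :
    l.length = L.card := by
  have h1 : l.toFinset = L := Finset.ext (fun v => by simpa using hm v)
  rw [← h1, List.toFinset_card_of_nodup hn]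

theorem find?_filter_ne (items : List (Int × Int)) (k v : Int) (h : v ≠ k) :
    (items.filter (fun p => !(p.1 == k))).find? (fun p => p.1 == v)
      = items.find? (fun p => p.1 == v) := by
  induction items with
  | nil => rfl
  | cons p rest ih =>
    by_cases hp : p.1 = k
    · have hkv : (k == v) = false := by simp; exact fun e => h e.symm
      simp [hp, hkv, ih]
    · by_cases hpv : p.1 = v
      · simp [hpv, h]
      · simp [hp, hpv, ih]

theorem get?_erase_of_ne (d : PySem.Dict Int Int) (k v : Int) (h : v ≠ k) :
    (d.erase k).get? v = d.get? v := by
  simp [PySem.Dict.erase, PySem.Dict.get?, find?_filter_ne d.items k v h]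

theorem getD_erase_of_ne (d : PySem.Dict Int Int) (k v : Int) (h : v ≠ k) :
    (d.erase k).getD v 0 = d.getD v 0 := by
  simp [PySem.Dict.getD, get?_erase_of_ne d k v h]

theorem getD_erase_self (d : PySem.Dict Int Int) (k : Int) :
    (d.erase k).getD k 0 = 0 := by
  apply PySem.Dict.getD_of_not_contains
  simp [PySem.Dict.erase, PySem.Dict.contains, List.any_filter]

theorem mem_keys_erase (d : PySem.Dict Int Int) (k v : Int) :
    v ∈ (d.erase k).keys ↔ v ∈ d.keys ∧ v ≠ k := by
  simp [PySem.Dict.erase, PySem.Dict.keys, List.mem_filter]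

theorem nodup_keys_erase (d : PySem.Dict Int Int) (k : Int) (h : d.keys.Nodup) :
    (d.erase k).keys.Nodup := by
  have hs : (d.items.filter (fun p => !(p.1 == k))).Sublist d.items := List.filter_sublist
  exact (hs.map Prod.fst).nodup h

theorem nodup_keys_modify (d : PySem.Dict Int Int) (t : Int) (f : Int → Int) (h : d.keys.Nodup) :
    (d.modify t 0 f).keys.Nodup := by
  rw [PySem.Dict.keys_modify]
  by_cases hc : d.contains t = true
  · rw [PySem.Dict.keys_insert_of_contains _ _ hc]; exact h
  · rw [PySem.Dict.keys_insert_of_not_contains _ _ (by simpa using hc)]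
    refine h.append (List.nodup_singleton _) ?_
    intro a ha hb
    simp at hb
    exact hc ((PySem.Dict.contains_iff_mem_keys d t).mpr (hb ▸ ha))

theorem mem_keys_modify (d : PySem.Dict Int Int) (t v : Int) (f : Int → Int) :
    v ∈ (d.modify t 0 f).keys ↔ v = t ∨ v ∈ d.keys := by
  rw [PySem.Dict.keys_modify, PySem.Dict.mem_keys_insert]

theorem size_eq_keys_length (d : PySem.Dict Int Int) : d.size = d.keys.length := by
  simp [PySem.Dict.size, PySem.Dict.keys]

theorem refCount_cons (L : Finset Int) (t : Int) (r : List Int) :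
    refCount L (t :: r)
      = (if (insert t L).card = r.toFinset.card then 1 else 0) + refCount (insert t L) r := rfl

theorem A_fold (r : List Int) : ∀ (ans : Int) (left right : PySem.Dict Int Int) (L : Finset Int),
    left.keys.Nodup → (∀ v, v ∈ left.keys ↔ v ∈ L) →
    right.keys.Nodup → (∀ v, v ∈ right.keys ↔ v ∈ r) →
    (∀ v, right.getD v 0 = r.count v) →
    (r.foldl stepA (ans, left, right)).1 = ans + refCount L r := by
  induction r with
  | nil => intro ans left right L _ _ _ _ _; simp [refCount]
  | cons t r ih =>
    intro ans left right L hLn hLm hRn hRm hRv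
    have hcountt : (right.modify t 0 (· - 1)).getD t 0 = (r.count t : Int) := by
      rw [PySem.Dict.getD_modify]
      simp [hRv t, List.count_cons_self]
    -- the new left dict
    set left' := left.modify t 0 (· + 1) with hleft'
    have hL'n : left'.keys.Nodup := nodup_keys_modify _ _ _ hLn
    have hL'm : ∀ v, v ∈ left'.keys ↔ v ∈ insert t L := by
      intro v; rw [mem_keys_modify]; simp [hLm v, Finset.mem_insert]
    have hL'size : left'.size = (insert t L).card := by
      rw [size_eq_keys_length]; exact len_card hL'n hL'm
    -- the new right dict
    set right0 := right.modify t 0 (· - 1) with hright0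
    set right' := if right0.getD t 0 = 0 then right0.erase t else right0 with hright'
    have hR'n : right'.keys.Nodup := by
      rw [hright']
      split_ifs
      · exact nodup_keys_erase _ _ (nodup_keys_modify _ _ _ hRn)
      · exact nodup_keys_modify _ _ _ hRn
    have hR'm : ∀ v, v ∈ right'.keys ↔ v ∈ r := by
      intro v
      rw [hright']
      split_ifs with h0
      · rw [hcountt] at h0
        have hct : r.count t = 0 := by exact_mod_cast h0
        have htr : t ∉ r := List.count_eq_zero.mp hct
        rw [mem_keys_erase, hright0, mem_keys_modify]
        constructor
        · rintro ⟨hv, hne⟩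
          rcases hv with rfl | hv
          · exact absurd rfl hne
          · rcases List.mem_cons.mp ((hRm v).mp hv) with rfl | h1
            · exact absurd rfl hne
            · exact h1
        · intro hv
          have hne : v ≠ t := fun e => htr (e ▸ hv)
          exact ⟨Or.inr ((hRm v).mpr (List.mem_cons_of_mem _ hv)), hne⟩
      · rw [hcountt] at h0
        have hct : t ∈ r := List.count_pos_iff.mp
          (Nat.pos_of_ne_zero (fun hh => h0 (by exact_mod_cast hh)))
        rw [hright0, mem_keys_modify]
        constructor
        · rintro (rfl | hv)
          · exact hct
          · rcases List.mem_cons.mp ((hRm v).mp hv) with rfl | h1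
            · exact hct
            · exact h1
        · intro hv; exact Or.inr ((hRm v).mpr (List.mem_cons_of_mem _ hv))
    have hR'v : ∀ v, right'.getD v 0 = r.count v := by
      intro v
      rw [hright']
      by_cases hvt : v = t
      · subst hvt
        split_ifs with h0
        · rw [getD_erase_self, hcountt] at *
          exact_mod_cast h0.symm
        · exact hcountt
      · have hbase : right0.getD v 0 = (r.count v : Int) := by
          rw [hright0, PySem.Dict.getD_modify, if_neg hvt, hRv v,
            List.count_cons]
          simp
          exact fun e => hvt e.symm
        split_ifs
        · rw [getD_erase_of_ne _ _ _ hvt]; exact hbase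
        · exact hbase
    have hR'size : right'.size = r.toFinset.card := by
      rw [size_eq_keys_length]
      exact len_card hR'n (fun v => by rw [hR'm v, List.mem_toFinset])
    -- one step of the fold
    have hstep : stepA (ans, left, right) t
        = (if (insert t L).card = r.toFinset.card then ans + 1 else ans, left', right') := by
      simp only [stepA, ← hleft', ← hright0, ← hright', hL'size, hR'size]
    rw [List.foldl_cons, hstep]
    rw [ih _ left' right' (insert t L) hL'n hL'm hR'n hR'm hR'v, refCount_cons]
    split_ifs <;> omega

theorem suf_spec (topping : List Int) :
    (topping.reverse.foldl stepSuf ([0], PySem.Set.empty)).1 = (fullSuf topping).reverse ∧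
    (topping.reverse.foldl stepSuf ([0], PySem.Set.empty)).2.Nodup ∧
    (∀ v, v ∈ (topping.reverse.foldl stepSuf ([0], PySem.Set.empty)).2 ↔ v ∈ topping) := by
  induction topping with
  | nil => exact ⟨rfl, List.nodup_nil, fun v => by simp [PySem.Set.empty]⟩
  | cons t r ih =>
    obtain ⟨h1, h2, h3⟩ := ih
    rw [List.reverse_cons, List.foldl_append]
    set st := (r.reverse.foldl stepSuf ([0], PySem.Set.empty)) with hst
    have hn' : (st.2.add t).Nodup := PySem.Set.nodup_add _ _ h2
    have hm' : ∀ v, v ∈ st.2.add t ↔ v ∈ t :: r := by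
      intro v
      rw [PySem.Set.mem_add]
      simp [h3 v, List.mem_cons]
      tauto
    have hlen : (st.2.add t).length = (t :: r).toFinset.card :=
      len_card hn' (fun v => by rw [hm' v, List.mem_toFinset])
    refine ⟨?_, hn', hm'⟩
    simp only [List.foldl_cons, List.foldl_nil, stepSuf, h1]
    show (fullSuf r).reverse ++ [PySem.Set.len (st.2.add t)] = (fullSuf (t :: r)).reverse
    rw [show fullSuf (t :: r) = ((t :: r).toFinset.card : Int) :: fullSuf r from rfl,
      List.reverse_cons]
    simp [PySem.Set.len, hlen]

theorem fullSuf_tail_cons (r : List Int) :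
    fullSuf r = ((r.toFinset.card : Int)) :: (fullSuf r).tail := by
  cases r <;> rfl

theorem B_fold (r : List Int) : ∀ (ans : Int) (left : PySem.Set Int) (L : Finset Int),
    left.Nodup → (∀ v, v ∈ left ↔ v ∈ L) →
    ((r.zip (fullSuf r).tail).foldl stepB (ans, left)).1 = ans + refCount L r := by
  induction r with
  | nil => intro ans left L _ _; simp [refCount]
  | cons t r ih =>
    intro ans left L hn hm
    have htail : (fullSuf (t :: r)).tail = fullSuf r := rfl
    rw [htail, fullSuf_tail_cons r]
    rw [List.zip_cons_cons, List.foldl_cons]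
    have hn' : (left.add t).Nodup := PySem.Set.nodup_add _ _ hn
    have hm' : ∀ v, v ∈ left.add t ↔ v ∈ insert t L := by
      intro v
      rw [PySem.Set.mem_add, Finset.mem_insert]
      simp [hm v]
      tauto
    have hlen : (left.add t).length = (insert t L).card := len_card hn' hm'
    have hstep : stepB (ans, left) (t, (r.toFinset.card : Int))
        = (if (insert t L).card = r.toFinset.card then ans + 1 else ans, left.add t) := by
      simp only [stepB, PySem.Set.len, hlen]
      congr 1
      by_cases h : (insert t L).card = r.toFinset.card
      · simp [h]
      · have : ((insert t L).card : Int) ≠ (r.toFinset.card : Int) := by exact_mod_cast h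
        simp [h, this]
    rw [hstep]
    rw [ih _ (left.add t) (insert t L) hn' hm', refCount_cons]
    split_ifs <;> omega

theorem solution_eq_ref (topping : List Int) : solution topping = refCount ∅ topping := by
  unfold solution
  rw [PySem.List.foldl_pyRange_zero_pyGetD' topping 0 stepA]
  rw [A_fold topping 0 PySem.Dict.empty (PySem.Dict.counter topping) ∅
    PySem.Dict.nodup_keys_empty
    (fun v => by simp [PySem.Dict.keys, PySem.Dict.empty])
    (PySem.Dict.nodup_keys_counter topping)
    (fun v => by rw [PySem.Dict.keys_counter, PySem.Set.mem_ofList])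
    (fun v => PySem.Dict.getD_counter topping v)]
  exact zero_add _

theorem solution_alt_eq_ref (topping : List Int) : solution_alt topping = refCount ∅ topping := by
  unfold solution_alt
  rw [(suf_spec topping).1, List.reverse_reverse]
  show ((topping.zip (PySem.List.slice (fullSuf topping) (some 1))).foldl stepB
      (0, PySem.Set.empty)).1 = refCount ∅ topping
  rw [PySem.List.slice_from _ (by norm_num : (0:Int) ≤ 1)]
  have hdrop : (fullSuf topping).drop (1 : Int).toNat = (fullSuf topping).tail := by
    simp [List.drop_one]
  rw [hdrop, B_fold topping 0 PySem.Set.empty ∅ List.nodup_nil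
    (fun v => by simp [PySem.Set.empty])]
  exact zero_add _

-- ===== VERDICT (by name: the statement is the Claim_ definition above) =====
theorem solution_spec : Claim_equal_solution := by
  intro topping _
  show solution topping = solution_alt topping
  rw [solution_eq_ref, solution_alt_eq_ref]
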